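-- pv_equiv track=rewrite | github.com/AdamZhouSE/pythonHomework | Code/CodeRecords/2506/60898/317070.py | func
-- ===== SOURCE A (Python) =====
-- def func(n : list) -> int :
--     MAX_LENGTH = 0
--     for i in range(len(n)):
--         cnt = 1
--         tmp = int(n[i])
--         for j in range(i+1,len(n)):
--             if int(n[j]) > tmp :
--                 tmp = int(n[j])
--                 cnt += 1
--         if cnt > MAX_LENGTH :
--             MAX_LENGTH = cnt
--     return MAX_LENGTH
-- ===== SOURCE B (Python) =====
-- def func(n: list) -> int:
--     # O(n): scan right-to-left with a monotonic stack of (value, chain-length)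
--     # pairs; the chain length of n[i] is 1 + chain length of its next greater
--     # element to the right; answer is the maximum chain length.
--     best = 0
--     stack = []  # (value, greedy-chain length starting at that value), top = last
--     for v in reversed(n):
--         v = int(v)
--         while stack and stack[-1][0] <= v:
--             stack.pop()
--         g = 1 + (stack[-1][1] if stack else 0)
--         stack.append((v, g))
--         if g > best:
--             best = g
--     return best
-- ===== Notes on version B (the rewrite author's own statement) =====
-- stated objective: faster
-- what changed: Replaced the quadratic per-start greedy rescan with a single right-to-left pass using a monotonic stack that stores each element's next-greater chain length (f(i)=1+f(nextGreater(i))), taking the maximum on the fly.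
import Mathlib
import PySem

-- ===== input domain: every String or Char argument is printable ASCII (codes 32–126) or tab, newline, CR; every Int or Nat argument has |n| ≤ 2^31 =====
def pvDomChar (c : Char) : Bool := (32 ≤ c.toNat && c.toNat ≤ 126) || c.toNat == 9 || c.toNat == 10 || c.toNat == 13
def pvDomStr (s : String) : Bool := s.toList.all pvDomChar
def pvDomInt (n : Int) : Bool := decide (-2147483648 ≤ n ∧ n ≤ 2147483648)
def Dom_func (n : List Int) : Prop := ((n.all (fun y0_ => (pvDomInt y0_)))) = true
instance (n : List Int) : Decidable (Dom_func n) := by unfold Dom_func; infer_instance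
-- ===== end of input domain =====

-- B replaces A's quadratic per-start rescans with one right-to-left monotonic-stack pass (asymptotically faster).

-- ===== PORT A =====
-- literal transliteration of A: outer loop over range(len(n)), inner greedy
-- rescan over range(i+1, len(n)); int(n[i]) on an int is the identity, n[j] → pyGetD (index always in range)
def func (n : List Int) : Int :=
  (PySem.List.pyRange 0 n.length 1).foldl
    (fun MAX_LENGTH i =>
      let ct := (PySem.List.pyRange (i + 1) n.length 1).foldl
        (fun (ct : Int × Int) j =>
          if PySem.List.pyGetD n j 0 > ct.2 then (ct.1 + 1, PySem.List.pyGetD n j 0) else ct)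
        (1, PySem.List.pyGetD n i 0)
      if ct.1 > MAX_LENGTH then ct.1 else MAX_LENGTH)
    0

-- ===== PORT B =====
-- literal transliteration of Source B: fold over reversed(n); stack top = list head
def func_alt (n : List Int) : Int :=
  (n.reverse.foldl
    (fun (st : List (Int × Int) × Int) v =>
      let stack := st.1.dropWhile (fun p => decide (p.1 ≤ v))
      let g : Int := 1 + (match stack with | [] => 0 | p :: _ => p.2)
      ((v, g) :: stack, if g > st.2 then g else st.2))
    ([], 0)).2

-- ===== PRECONDITION & SPEC =====
def Spec_func (n : List Int) (out : Int) : Prop := out = func_alt n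
instance (n : List Int) (out : Int) : Decidable (Spec_func n out) := by unfold Spec_func; infer_instance

-- ===== CLAIM (what is proved, stated in full; the proofs are below) =====
def Claim_equal_func : Prop := ∀ (n : List Int), Dom_func n → Spec_func n (func n)

-- ===== LEMMAS AND PROOFS =====

-- greedy left-to-right-maxima count over a suffix, continuing from current max v
def chainF : Int → List Int → Int
  | _, [] => 0
  | v, x :: xs => if x > v then 1 + chainF x xs else chainF v xs

-- reference value: max over all suffix starts of (1 + chainF head rest)
def refA : List Int → Int
  | [] => 0
  | x :: xs => max (1 + chainF x xs) (refA xs)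

theorem refA_nonneg (l : List Int) : 0 ≤ refA l := by
  cases l with
  | nil => simp [refA]
  | cons x xs =>
      have h := refA_nonneg xs
      simp [refA]
      omega

-- ---- A side ----

theorem inner_fold_eq (l : List Int) : ∀ (c t : Int),
    (l.foldl (fun (ct : Int × Int) x => if x > ct.2 then (ct.1 + 1, x) else ct) (c, t)).1
      = c + chainF t l := by
  induction l with
  | nil => intro c t; simp [chainF]
  | cons x xs ih =>
      intro c t
      by_cases h : x > t
      · simp [List.foldl, h, chainF, ih]; omega
      · simp [List.foldl, h, chainF, ih]

def loopA : List Int → Int → Int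
  | [], m => m
  | x :: xs, m => loopA xs (if 1 + chainF x xs > m then 1 + chainF x xs else m)

theorem loopA_eq (l : List Int) : ∀ (m : Int), 0 ≤ m → loopA l m = max m (refA l) := by
  induction l with
  | nil => intro m hm; simp [loopA, refA]; omega
  | cons x xs ih =>
      intro m hm
      have hstep : (if 1 + chainF x xs > m then 1 + chainF x xs else m)
          = max m (1 + chainF x xs) := by split_ifs <;> omega
      have hnn : 0 ≤ max m (1 + chainF x xs) := le_max_of_le_left hm
      simp only [loopA, hstep, ih _ hnn, refA]
      omega

theorem outerA (n : List Int) : ∀ (k : Nat), k ≤ n.length → ∀ (m : Int),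
    (PySem.List.pyRange (k : Int) n.length 1).foldl
      (fun MAX_LENGTH i =>
        let ct := (PySem.List.pyRange (i + 1) n.length 1).foldl
          (fun (ct : Int × Int) j =>
            if PySem.List.pyGetD n j 0 > ct.2 then (ct.1 + 1, PySem.List.pyGetD n j 0) else ct)
          (1, PySem.List.pyGetD n i 0)
        if ct.1 > MAX_LENGTH then ct.1 else MAX_LENGTH)
      m = loopA (n.drop k) m := by
  intro k
  induction hk : n.length - k generalizing k with
  | zero =>
      intro hle m
      have hk' : n.length ≤ k := by omega
      rw [PySem.List.pyRange_one_eq_nil (by exact_mod_cast hk')]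
      rw [List.drop_eq_nil_of_le hk']
      simp [loopA]
  | succ d ih =>
      intro hle m
      have hklt : k < n.length := by omega
      rw [PySem.List.pyRange_one_cons (by exact_mod_cast hklt)]
      rw [List.foldl_cons]
      have hinner : ((PySem.List.pyRange ((k : Int) + 1) n.length 1).foldl
          (fun (ct : Int × Int) j =>
            if PySem.List.pyGetD n j 0 > ct.2 then (ct.1 + 1, PySem.List.pyGetD n j 0) else ct)
          (1, PySem.List.pyGetD n (k : Int) 0)).1
          = 1 + chainF (n[k]'hklt) (n.drop (k + 1)) := by
        have hf := PySem.List.foldl_pyRange_pyGetD (xs := n) (a := (k : Int) + 1)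
          (f := fun (ct : Int × Int) x => if x > ct.2 then (ct.1 + 1, x) else ct)
          (d := 0) (init := (1, PySem.List.pyGetD n (k : Int) 0)) (by positivity)
        simp only [PySem.List.len_eq] at hf
        have hx : PySem.List.pyGetD n (k : Int) 0 = n[k]'hklt := by
          rw [PySem.List.pyGetD_natCast]; simp [List.getD, hklt]
        have ha : ((k : Int) + 1).toNat = k + 1 := by omega
        rw [hf, ha, hx, inner_fold_eq]
      have hdrop : n.drop k = (n[k]'hklt) :: n.drop (k + 1) :=
        (List.drop_eq_getElem_cons hklt)
      have hrec := ih (k + 1) (by omega) (by omega)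
      have hcast : ((k : Int) + 1) = ((k + 1 : Nat) : Int) := by push_cast; ring
      simp only [hinner, hdrop, loopA]
      rw [hcast, hrec]

theorem funcA_eq_refA (n : List Int) : func n = refA n := by
  unfold func
  have h := outerA n 0 (Nat.zero_le _) 0
  simpa [loopA_eq, refA_nonneg, max_eq_right (refA_nonneg n)] using h

-- ---- B side ----

def stepB (st : List (Int × Int) × Int) (v : Int) : List (Int × Int) × Int :=
  let stack := st.1.dropWhile (fun p => decide (p.1 ≤ v))
  let g : Int := 1 + (match stack with | [] => 0 | p :: _ => p.2)
  ((v, g) :: stack, if g > st.2 then g else st.2)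

def firstG (v : Int) (st : List (Int × Int)) : Int :=
  match st.dropWhile (fun p => decide (p.1 ≤ v)) with
  | [] => 0
  | p :: _ => p.2

theorem dropWhile_le_le (x y : Int) (h : x ≤ y) (st : List (Int × Int)) :
    (st.dropWhile (fun p => decide (p.1 ≤ x))).dropWhile (fun p => decide (p.1 ≤ y))
      = st.dropWhile (fun p => decide (p.1 ≤ y)) := by
  induction st with
  | nil => simp
  | cons p ps ih =>
      by_cases hp : p.1 ≤ x
      · have hy : p.1 ≤ y := le_trans hp h
        simp [List.dropWhile, hp, hy, ih]
      · simp [List.dropWhile, hp]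

theorem invB (l : List Int) :
    let s := l.foldr (fun x st => stepB st x) (([] : List (Int × Int)), (0 : Int))
    (∀ v, firstG v s.1 = chainF v l) ∧ s.2 = refA l := by
  induction l with
  | nil => exact ⟨fun v => rfl, rfl⟩
  | cons x xs ih =>
      simp only [List.foldr_cons]
      simp only at ih
      generalize hs : xs.foldr (fun x st => stepB st x) (([] : List (Int × Int)), (0 : Int)) = s at ih
      obtain ⟨h1, h2⟩ := ih
      have hg : firstG x s.1 = chainF x xs := h1 x
      have hstep1 : (stepB s x).1
          = (x, 1 + firstG x s.1) :: s.1.dropWhile (fun p => decide (p.1 ≤ x)) := rfl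
      have hstep2 : (stepB s x).2
          = if 1 + firstG x s.1 > s.2 then 1 + firstG x s.1 else s.2 := rfl
      constructor
      · intro v
        rw [hstep1]
        by_cases hxv : x ≤ v
        · have hdw : ∀ g : Int, ((x, g) :: s.1.dropWhile (fun p => decide (p.1 ≤ x))).dropWhile
              (fun p => decide (p.1 ≤ v)) = s.1.dropWhile (fun p => decide (p.1 ≤ v)) := by
            intro g
            rw [List.dropWhile_cons]
            simp [hxv, dropWhile_le_le x v hxv]
          have hv := h1 v
          unfold firstG
          unfold firstG at hv
          rw [hdw, hv]
          simp [chainF, show ¬ v < x from not_lt.mpr hxv]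
        · have hgx := hg
          unfold firstG
          unfold firstG at hgx
          rw [List.dropWhile_cons]
          simp only [show decide ((x : Int) ≤ v) = false from by simpa using hxv]
          simp [chainF, show v < x from lt_of_not_ge hxv, hgx]
      · rw [hstep2, hg, h2]
        simp only [refA]
        split_ifs <;> omega

theorem funcB_eq_refA (n : List Int) : func_alt n = refA n := by
  unfold func_alt
  rw [List.foldl_reverse]
  have h := (invB n).2
  exact h

-- ===== VERDICT (by name: the statement is the Claim_ definition above) =====
theorem func_spec : Claim_equal_func := by
  intro n _
  unfold Spec_func
  rw [funcA_eq_refA, funcB_eq_refA]
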